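-- pv_equiv track=rewrite | github.com/erichan1/CS1 | lab2/lab2b.py | count_letter_matches
-- ===== SOURCE A (Python) =====
-- def count_letter_matches(str1,str2):
--     '''Takes two strings as arguments and
--     returns how many total letter matches there are between them.'''
--     matchCount=0
--     list1= list(str1)
--     list2=list(str2)
--     while(len(list1)>0):
--         if list1[0] in list2:
--             matchCount += 1
--             list2.remove(list1[0])
--         del list1[0]
--     return matchCount
-- ===== SOURCE B (Python) =====
-- def count_letter_matches(str1, str2):
--     '''Takes two strings as arguments and
--     returns how many total letter matches there are between them.'''
--     a = sorted(str1)
--     b = sorted(str2)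
--     i = j = count = 0
--     while i < len(a) and j < len(b):
--         if a[i] == b[j]:
--             count += 1
--             i += 1
--             j += 1
--         elif a[i] < b[j]:
--             i += 1
--         else:
--             j += 1
--     return count
-- ===== Notes on version B (the rewrite author's own statement) =====
-- stated objective: faster
-- what changed: Replaces the quadratic scan-and-remove loop (a membership test plus list.remove on the shrinking second list for every character) by sorting both strings once and counting matches with a single two-pointer merge pass.
import Mathlib
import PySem

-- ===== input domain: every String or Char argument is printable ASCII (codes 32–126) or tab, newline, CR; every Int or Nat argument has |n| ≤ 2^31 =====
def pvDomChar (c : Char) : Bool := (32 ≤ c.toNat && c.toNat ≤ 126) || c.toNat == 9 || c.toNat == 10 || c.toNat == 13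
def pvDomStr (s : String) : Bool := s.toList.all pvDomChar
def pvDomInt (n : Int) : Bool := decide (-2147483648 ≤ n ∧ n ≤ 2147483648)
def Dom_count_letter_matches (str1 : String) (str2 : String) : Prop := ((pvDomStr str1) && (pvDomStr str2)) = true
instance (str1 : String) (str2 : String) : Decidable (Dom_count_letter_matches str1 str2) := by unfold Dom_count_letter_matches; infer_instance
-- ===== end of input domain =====

-- ===== PORT A =====
-- B sorts both strings once and counts with one two-pointer merge pass instead of
-- A's per-character membership scan + remove on the shrinking second list (faster).
-- while(len(list1)>0): if list1[0] in list2: matchCount+=1; list2.remove(list1[0]); del list1[0]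
-- (list2.remove(c) under the 'c in list2' guard equals List.erase: PySem.List.remove?_eq_some_erase)
def pvCountA : List Char → List Char → Int → Int
  | [], _, matchCount => matchCount
  | c :: rest, list2, matchCount =>
    if c ∈ list2 then pvCountA rest (list2.erase c) (matchCount + 1)
    else pvCountA rest list2 matchCount

def count_letter_matches (str1 : String) (str2 : String) : Int :=
  pvCountA str1.toList str2.toList 0

-- ===== PORT B =====
-- the two-pointer while loop of Source B, as recursion on the two sorted lists
def pvMergeCount : List Char → List Char → Int
  | [], _ => 0
  | _ :: _, [] => 0
  | a :: s, b :: t =>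
    if a = b then 1 + pvMergeCount s t
    else if a < b then pvMergeCount s (b :: t)
    else pvMergeCount (a :: s) t
  termination_by l1 l2 => l1.length + l2.length

def count_letter_matches_alt (str1 : String) (str2 : String) : Int :=
  pvMergeCount (PySem.List.sorted str1.toList (fun c => c) false)
               (PySem.List.sorted str2.toList (fun c => c) false)

-- ===== PRECONDITION & SPEC =====
def Spec_count_letter_matches (str1 : String) (str2 : String) (out : Int) : Prop := out = count_letter_matches_alt str1 str2
instance (str1 : String) (str2 : String) (out : Int) : Decidable (Spec_count_letter_matches str1 str2 out) := by unfold Spec_count_letter_matches; infer_instance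

-- ===== CLAIM (what is proved, stated in full; the proofs are below) =====
def Claim_equal_count_letter_matches : Prop := ∀ (str1 : String) (str2 : String), Dom_count_letter_matches str1 str2 → Spec_count_letter_matches str1 str2 (count_letter_matches str1 str2)

-- ===== LEMMAS AND PROOFS =====

lemma pvCountA_eq (l1 : List Char) : ∀ (l2 : List Char) (n : Int),
    pvCountA l1 l2 n = n + (((l1 : Multiset Char)) ∩ (l2 : Multiset Char)).card := by
  induction l1 with
  | nil => intro l2 n; simp [pvCountA]
  | cons c rest ih =>
    intro l2 n
    have hcc : ((c :: rest : List Char) : Multiset Char) = c ::ₘ (rest : Multiset Char) := rfl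
    by_cases h : c ∈ l2
    · rw [pvCountA, if_pos h, ih, hcc,
        Multiset.cons_inter_of_pos _ (by simpa using h), Multiset.coe_erase]
      simp; ring
    · rw [pvCountA, if_neg h, ih, hcc,
        Multiset.cons_inter_of_neg _ (by simpa using h)]

lemma pvMergeCount_eq : ∀ (l1 l2 : List Char),
    l1.Pairwise (· ≤ ·) → l2.Pairwise (· ≤ ·) →
    pvMergeCount l1 l2 = (((l1 : Multiset Char)) ∩ (l2 : Multiset Char)).card
  | [], l2, _, _ => by simp [pvMergeCount]
  | a :: s, [], _, _ => by simp [pvMergeCount]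
  | a :: s, b :: t, h1, h2 => by
    have hcs : ((a :: s : List Char) : Multiset Char) = a ::ₘ (s : Multiset Char) := rfl
    have hct : ((b :: t : List Char) : Multiset Char) = b ::ₘ (t : Multiset Char) := rfl
    rw [pvMergeCount]
    by_cases hab : a = b
    · subst hab
      rw [if_pos rfl, pvMergeCount_eq s t h1.tail h2.tail, hcs, hct,
        Multiset.cons_inter_of_pos _ (Multiset.mem_cons_self a _), Multiset.erase_cons_head]
      simp; ring
    · rw [if_neg hab]
      by_cases hlt : a < b
      · have hna : a ∉ (b ::ₘ (t : Multiset Char)) := by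
          intro hm
          rcases Multiset.mem_cons.mp hm with h | h
          · exact absurd h hab
          · exact absurd (lt_of_lt_of_le hlt (List.rel_of_pairwise_cons h2 (by simpa using h)))
              (lt_irrefl a)
        rw [if_pos hlt, pvMergeCount_eq s (b :: t) h1.tail h2, hcs, hct,
          Multiset.cons_inter_of_neg _ hna]
      · have hba : b < a := lt_of_le_of_ne (le_of_not_gt hlt) (Ne.symm hab)
        have hnb : b ∉ (a ::ₘ (s : Multiset Char)) := by
          intro hm
          rcases Multiset.mem_cons.mp hm with h | h
          · exact absurd h (ne_of_lt hba)
          · exact absurd (lt_of_lt_of_le hba (List.rel_of_pairwise_cons h1 (by simpa using h)))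
              (lt_irrefl b)
        rw [if_neg hlt, pvMergeCount_eq (a :: s) t h1 h2.tail, hcs, hct,
          Multiset.inter_comm _ (b ::ₘ (t : Multiset Char)),
          Multiset.cons_inter_of_neg _ hnb, Multiset.inter_comm]
  termination_by l1 l2 => l1.length + l2.length

lemma pvSorted_coe (l : List Char) :
    ((PySem.List.sorted l (fun c => c) false : List Char) : Multiset Char) = (l : Multiset Char) :=
  Multiset.coe_eq_coe.mpr (PySem.List.sorted_perm l _ _)

-- ===== VERDICT (by name: the statement is the Claim_ definition above) =====
theorem count_letter_matches_spec : Claim_equal_count_letter_matches := by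
  intro str1 str2 _
  unfold Spec_count_letter_matches count_letter_matches count_letter_matches_alt
  rw [pvCountA_eq, pvMergeCount_eq _ _
      (by simpa using PySem.List.sorted_pairwise str1.toList (fun c => c))
      (by simpa using PySem.List.sorted_pairwise str2.toList (fun c => c)),
    pvSorted_coe, pvSorted_coe]
  simp
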